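-- pv_equiv track=rewrite | github.com/ncara/SVD | SVD_MmCPDII.py | collapsdim
-- ===== SOURCE A (Python) =====
-- def collapsdim(iterator):
--     """
--     Collapse the dimensions of a given iterator
--     Parameters:
--     - iterator: an iterator containing sublists of length 3
--     Returns:
--     - tuple: containing the collapsed dimensions of the iterator, the index of the minimum dimension and the index of the maximum dimension
--     """
--     dimaps=[]
--     nmin=0
--     nmax=0
--     for i in range(0,len(iterator)):
--         dimaps.append(0)
--         for j in [0,1,2]:
--             dimaps[i]+=iterator[i][j]
--         if dimaps[nmin]>dimaps[i]:
--             nmin=i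
--         if dimaps[nmax]<dimaps[i]:
--             nmax=i
--     return(dimaps,nmin,nmax)
-- ===== SOURCE B (Python) =====
-- def collapsdim(iterator):
--     if not iterator:
--         return ([], 0, 0)
--     dimaps = [x[0] + x[1] + x[2] for x in iterator]
--     return (dimaps, dimaps.index(min(dimaps)), dimaps.index(max(dimaps)))
-- ===== Notes on version B (the rewrite author's own statement) =====
-- stated objective: idiomatic
-- what changed: Replaces the single loop that appends and maintains running min/max indices via repeated indexed writes with a comprehension building the sums list, then dimaps.index(min(dimaps)) / dimaps.index(max(dimaps)) for the two indices (first occurrence, matching A's strict-inequality updates).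
import Mathlib
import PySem

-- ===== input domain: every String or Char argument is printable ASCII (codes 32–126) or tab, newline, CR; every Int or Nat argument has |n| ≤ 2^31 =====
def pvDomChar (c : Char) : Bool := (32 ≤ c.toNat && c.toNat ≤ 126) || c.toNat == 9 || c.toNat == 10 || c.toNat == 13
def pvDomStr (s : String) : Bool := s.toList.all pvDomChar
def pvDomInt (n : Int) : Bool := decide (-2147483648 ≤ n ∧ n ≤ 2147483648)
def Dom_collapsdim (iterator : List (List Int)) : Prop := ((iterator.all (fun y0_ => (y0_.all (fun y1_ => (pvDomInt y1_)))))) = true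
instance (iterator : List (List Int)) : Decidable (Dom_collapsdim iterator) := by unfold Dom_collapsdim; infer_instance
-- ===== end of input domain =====

-- B rebuilds the sums list with a comprehension and finds the two indices with index(min)/index(max), instead of A's single running-min/max loop; same return value.

-- ===== PORT A =====
-- literal port of A's loop body: state (dimaps, nmin, nmax); indices i, nmin, nmax
-- are always nonnegative and in range here (i comes from range(0,len), nmin/nmax are
-- previous i's), so .toNat / .getD are exact on the admitted inputs (Pre_ excludes
-- rows shorter than 3, on which Python A raises IndexError).
def collapsdimStep (iterator : List (List Int)) (st : List Int × Int × Int) (i : Int) : List Int × Int × Int :=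
  let dimaps := st.1 ++ [0]                         -- dimaps.append(0)
  let row := (PySem.List.pyGet? iterator i).getD []
  let dimaps := [(0 : Int), 1, 2].foldl             -- for j in [0,1,2]: dimaps[i] += iterator[i][j]
    (fun (d : List Int) (j : Int) => d.set i.toNat (d.getD i.toNat 0 + (PySem.List.pyGet? row j).getD 0)) dimaps
  let nmin := if dimaps.getD st.2.1.toNat (0 : Int) > dimaps.getD i.toNat (0 : Int) then i else st.2.1
  let nmax := if dimaps.getD st.2.2.toNat (0 : Int) < dimaps.getD i.toNat (0 : Int) then i else st.2.2
  (dimaps, nmin, nmax)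

def collapsdim (iterator : List (List Int)) : List Int × Int × Int :=
  (PySem.List.pyRange 0 (Int.ofNat iterator.length) 1).foldl (collapsdimStep iterator) ([], 0, 0)

-- ===== PORT B =====
def collapsdim_alt (iterator : List (List Int)) : List Int × Int × Int :=
  if iterator = [] then ([], 0, 0)
  else
    let dimaps := iterator.map (fun x =>
      (PySem.List.pyGet? x 0).getD 0 + (PySem.List.pyGet? x 1).getD 0 + (PySem.List.pyGet? x 2).getD 0)
    (dimaps,
     ((PySem.List.index? dimaps ((PySem.List.min? dimaps (fun y => y)).getD 0)).getD 0 : Nat),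
     ((PySem.List.index? dimaps ((PySem.List.max? dimaps (fun y => y)).getD 0)).getD 0 : Nat))

-- ===== PRECONDITION & SPEC =====
-- Pre_ excludes inputs containing a sublist of length < 3, on which Python A raises IndexError.
def Pre_collapsdim (iterator : List (List Int)) : Prop :=
  ∀ l ∈ iterator, 3 ≤ l.length
instance (iterator : List (List Int)) : Decidable (Pre_collapsdim iterator) := by
  unfold Pre_collapsdim; infer_instance
def pvWitness_collapsdim : List (List Int) := [[1, 2, 3], [0, -1, 5], [2, 2, 2]]

def Spec_collapsdim (iterator : List (List Int)) (out : List Int × Int × Int) : Prop := out = collapsdim_alt iterator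
instance (iterator : List (List Int)) (out : List Int × Int × Int) : Decidable (Spec_collapsdim iterator out) := by unfold Spec_collapsdim; infer_instance

-- ===== CLAIM (what is proved, stated in full; the proofs are below) =====
def Claim_equal_collapsdim : Prop := ∀ (iterator : List (List Int)), Dom_collapsdim iterator → Pre_collapsdim iterator → Spec_collapsdim iterator (collapsdim iterator)

-- ===== LEMMAS AND PROOFS =====

-- the per-row sum B computes
def sum3 (x : List Int) : Int :=
  (PySem.List.pyGet? x 0).getD 0 + (PySem.List.pyGet? x 1).getD 0 + (PySem.List.pyGet? x 2).getD 0

-- B's two index computations, as functions of the sums list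
def bmin (s : List Int) : Int :=
  ((PySem.List.index? s ((PySem.List.min? s (fun y => y)).getD 0)).getD 0 : Nat)
def bmax (s : List Int) : Int :=
  ((PySem.List.index? s ((PySem.List.max? s (fun y => y)).getD 0)).getD 0 : Nat)

theorem getD_append_self (s : List Int) (a : Int) : (s ++ [a]).getD s.length 0 = a := by
  rw [List.getD_append_right _ _ _ _ le_rfl]; simp

theorem set_append_self (s : List Int) (a b : Int) : (s ++ [a]).set s.length b = s ++ [b] := by
  rw [List.set_append_right _ _ le_rfl]; simp

theorem inner_eval (s row : List Int) :
    [(0 : Int), 1, 2].foldl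
      (fun (d : List Int) (j : Int) => d.set s.length (d.getD s.length 0 + (PySem.List.pyGet? row j).getD 0)) (s ++ [0])
    = s ++ [sum3 row] := by
  simp only [List.foldl]
  rw [getD_append_self, set_append_self, getD_append_self, set_append_self,
      getD_append_self, set_append_self, sum3]
  ring_nf

theorem bmin_step (s : List Int) (v : Int) :
    (if (s ++ [v]).getD (bmin s).toNat 0 > v then (s.length : Int) else bmin s) = bmin (s ++ [v]) := by
  cases s with
  | nil =>
    simp [bmin, PySem.List.min?_id_cons]
  | cons x t =>
    have hmin : PySem.List.min? (x :: t) (fun y => y) = some (t.foldl min x) :=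
      PySem.List.min?_id_cons x t
    set m := t.foldl min x with hm
    have hmem : m ∈ x :: t := PySem.List.min?_mem hmin
    have hle : ∀ z ∈ x :: t, m ≤ z := PySem.List.min?_isMin hmin
    obtain ⟨k, hidx⟩ : ∃ k, PySem.List.index? (x :: t) m = some k :=
      Option.isSome_iff_exists.mp ((PySem.List.index?_isSome_iff _ _).mpr hmem)
    obtain ⟨hk, hgetk, -⟩ := PySem.List.getElem_of_index?_eq_some hidx
    have hbmin : bmin (x :: t) = (k : Int) := by
      unfold bmin; rw [hmin, Option.getD_some, hidx, Option.getD_some]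
    have hmin' : PySem.List.min? ((x :: t) ++ [v]) (fun y => y) = some (min m v) := by
      rw [List.cons_append, PySem.List.min?_id_cons, List.foldl_append]
      simp [hm]
    have hgetD : ((x :: t) ++ [v]).getD (bmin (x :: t)).toNat 0 = m := by
      rw [hbmin]
      simp only [Int.toNat_natCast]
      rw [List.getD_append _ _ _ _ hk, List.getD_eq_getElem _ _ hk, hgetk]
    by_cases hc : v < m
    · have hnotmem : v ∉ (x :: t) := fun hv => absurd (hle v hv) (not_le.mpr hc)
      have hidx' : PySem.List.index? ((x :: t) ++ [v]) v = some (x :: t).length :=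
        PySem.List.index?_append_singleton_self _ v hnotmem
      rw [hgetD, if_pos hc]
      unfold bmin
      rw [hmin', Option.getD_some, min_eq_right hc.le, hidx', Option.getD_some]
    · have hidx' : PySem.List.index? ((x :: t) ++ [v]) m = PySem.List.index? (x :: t) m :=
      PySem.List.index?_append_of_mem _ hmem
      rw [hgetD, if_neg hc]
      unfold bmin
      rw [hmin', Option.getD_some, min_eq_left (not_lt.mp hc), hidx', hmin, Option.getD_some]

theorem bmax_step (s : List Int) (v : Int) :
    (if (s ++ [v]).getD (bmax s).toNat 0 < v then (s.length : Int) else bmax s) = bmax (s ++ [v]) := by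
  cases s with
  | nil =>
    simp [bmax, PySem.List.max?_id_cons]
  | cons x t =>
    have hmax : PySem.List.max? (x :: t) (fun y => y) = some (t.foldl max x) :=
      PySem.List.max?_id_cons x t
    set m := t.foldl max x with hm
    have hmem : m ∈ x :: t := PySem.List.max?_mem hmax
    have hge : ∀ z ∈ x :: t, z ≤ m := PySem.List.max?_isMax hmax
    obtain ⟨k, hidx⟩ : ∃ k, PySem.List.index? (x :: t) m = some k :=
      Option.isSome_iff_exists.mp ((PySem.List.index?_isSome_iff _ _).mpr hmem)
    obtain ⟨hk, hgetk, -⟩ := PySem.List.getElem_of_index?_eq_some hidx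
    have hbmax : bmax (x :: t) = (k : Int) := by
      unfold bmax; rw [hmax, Option.getD_some, hidx, Option.getD_some]
    have hmax' : PySem.List.max? ((x :: t) ++ [v]) (fun y => y) = some (max m v) := by
      rw [List.cons_append, PySem.List.max?_id_cons, List.foldl_append]
      simp [hm]
    have hgetD : ((x :: t) ++ [v]).getD (bmax (x :: t)).toNat 0 = m := by
      rw [hbmax]
      simp only [Int.toNat_natCast]
      rw [List.getD_append _ _ _ _ hk, List.getD_eq_getElem _ _ hk, hgetk]
    by_cases hc : m < v
    · have hnotmem : v ∉ (x :: t) := fun hv => absurd (hge v hv) (not_le.mpr hc)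
      have hidx' : PySem.List.index? ((x :: t) ++ [v]) v = some (x :: t).length :=
        PySem.List.index?_append_singleton_self _ v hnotmem
      rw [hgetD, if_pos hc]
      unfold bmax
      rw [hmax', Option.getD_some, max_eq_right hc.le, hidx', Option.getD_some]
    · have hidx' : PySem.List.index? ((x :: t) ++ [v]) m = PySem.List.index? (x :: t) m :=
      PySem.List.index?_append_of_mem _ hmem
      rw [hgetD, if_neg hc]
      unfold bmax
      rw [hmax', Option.getD_some, max_eq_left (not_lt.mp hc), hidx', hmax, Option.getD_some]

theorem collapsdim_closed (ys : List (List Int)) :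
    collapsdim ys = (ys.map sum3, bmin (ys.map sum3), bmax (ys.map sum3)) := by
  induction ys using List.reverseRecOn with
  | nil => decide
  | append_singleton ys y ih =>
    have hbody : ∀ (acc : List Int × Int × Int),
        ∀ i ∈ PySem.List.pyRange 0 ((ys.length : Int)) 1,
        collapsdimStep (ys ++ [y]) acc i = collapsdimStep ys acc i := by
      intro acc i hi
      rw [PySem.List.mem_pyRange_one] at hi
      have h0 : 0 ≤ i := hi.1
      have h2 : i.toNat < ys.length := by
        have := hi.2
        omega
      unfold collapsdimStep
      have e : PySem.List.pyGet? (ys ++ [y]) i = PySem.List.pyGet? ys i := by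
        rw [PySem.List.pyGet?_of_nonneg _ h0, PySem.List.pyGet?_of_nonneg _ h0,
            List.getElem?_append_left h2]
      simp only [e]
    have hpref : (PySem.List.pyRange 0 ((ys.length : Int)) 1).foldl
        (collapsdimStep (ys ++ [y])) ([], 0, 0) = collapsdim ys := by
      rw [PySem.List.foldl_congr_mem _ _ _ _ hbody]
      unfold collapsdim
      norm_cast
    have hrow : (PySem.List.pyGet? (ys ++ [y]) ((ys.length : Int))).getD [] = y := by
      rw [PySem.List.pyGet?_natCast]
      simp
    have hlen : Int.ofNat (ys ++ [y]).length = (ys.length : Int) + 1 := by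
      simp [List.length_append]
    unfold collapsdim
    rw [hlen, PySem.List.pyRange_one_succ_right (Int.natCast_nonneg ys.length),
        List.foldl_append, hpref, ih]
    simp only [List.foldl_cons, List.foldl_nil]
    unfold collapsdimStep
    simp only [hrow, Int.toNat_natCast]
    set s := ys.map sum3 with hs
    have hslen : ys.length = s.length := by simp [hs]
    rw [hslen, inner_eval s y, getD_append_self]
    rw [bmin_step, bmax_step]
    simp [hs, sum3]

theorem alt_closed (ys : List (List Int)) :
    collapsdim_alt ys = (ys.map sum3, bmin (ys.map sum3), bmax (ys.map sum3)) := by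
  cases ys with
  | nil => decide
  | cons x t => rfl

-- ===== VERDICT (by name: the statement is the Claim_ definition above) =====
theorem collapsdim_spec : Claim_equal_collapsdim := by
  intro it _ _
  unfold Spec_collapsdim
  rw [collapsdim_closed, alt_closed]
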